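-- pv_equiv track=rewrite | github.com/MrBrantCode/unitest_baseline | mut_generate/mist_train_cf/cf_98468/solution.py | generate_multiplication_table
-- ===== SOURCE A (Python) =====
-- def generate_multiplication_table(numbers, output_format="decimal"):
--     def is_prime(n):
--         if n < 2:
--             return False
--         for i in range(2, int(sqrt(n))+1):
--             if n % i == 0:
--                 return False
--         return True
--
--     from math import sqrt
--     primes = [n for n in numbers if is_prime(n)]
--     table = [[None] * (len(primes) + 1) for _ in range(len(primes) + 1)]
--     for i in range(len(primes)):
--         table[0][i+1] = primes[i]
--         table[i+1][0] = primes[i]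
--         for j in range(i+1):
--             table[i+1][j+1] = primes[i] * primes[j]
--             if i != j:
--                 table[j+1][i+1] = table[i+1][j+1]
--     if output_format == "binary":
--         for i in range(len(primes)+1):
--             for j in range(len(primes)+1):
--                 if table[i][j] is not None:
--                     table[i][j] = bin(table[i][j])[2:]
--     return table
-- ===== SOURCE B (Python) =====
-- def generate_multiplication_table(numbers, output_format="decimal"):
--     from math import isqrt
--
--     def is_prime(n):
--         return n >= 2 and all(n % d != 0 for d in range(2, isqrt(n) + 1))
--
--     primes = [n for n in numbers if is_prime(n)]
--     table = [[None] + primes] + [[p] + [p * q for q in primes] for p in primes]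
--     if output_format == "binary":
--         table = [[x if x is None else bin(x)[2:] for x in row] for row in table]
--     return table
-- ===== Notes on version B (the rewrite author's own statement) =====
-- stated objective: simpler
-- what changed: B builds the table directly as a header row plus one comprehension row [p]+[p*q for q in primes] per prime, instead of A's preallocated None matrix mutated via the upper-triangle-and-mirror index loops; the binary conversion becomes a single comprehension pass.
-- outside the precondition, e.g. on generate_multiplication_table([2], 'binary'): A returns [[None, '10'], ['10', '100']], B returns [[None, '10'], ['10', '100']]
import Mathlib
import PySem

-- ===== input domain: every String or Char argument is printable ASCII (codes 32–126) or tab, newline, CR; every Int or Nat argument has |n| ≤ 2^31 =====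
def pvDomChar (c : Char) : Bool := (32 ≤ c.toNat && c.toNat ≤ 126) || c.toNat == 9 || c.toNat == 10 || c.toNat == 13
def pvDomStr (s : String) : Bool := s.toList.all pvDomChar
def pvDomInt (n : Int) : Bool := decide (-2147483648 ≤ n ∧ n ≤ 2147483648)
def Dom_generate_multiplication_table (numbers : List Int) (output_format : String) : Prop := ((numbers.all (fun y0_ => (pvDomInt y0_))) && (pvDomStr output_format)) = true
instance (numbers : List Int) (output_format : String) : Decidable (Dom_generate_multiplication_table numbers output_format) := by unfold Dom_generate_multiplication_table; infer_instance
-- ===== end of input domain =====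

-- B builds each row directly by comprehension instead of A's mutate-a-None-matrix
-- triangle-and-mirror index loops; objective: simpler. Return value only (A mutates
-- only its local table). The binary output mode returns strings and is outside Pre_.

-- ===== PORT A =====
-- int(sqrt(n))+1 loop bound: ported as Nat.sqrt n.toNat + 1, which yields the same
-- is_prime result for the domain's |n| ≤ 2^31 (a float rounding up to the next integer
-- can only add the non-divisor isqrt(n)+1 as a trial divisor).
def pvIsPrimeA (n : Int) : Bool :=
  if n < 2 then false
  else (PySem.List.pyRange 2 ((Nat.sqrt n.toNat : Int) + 1) 1).all
        (fun i => !(PySem.Int.mod n i == 0))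

-- table[i][j] = v with 0 ≤ i,j in range (as in A's loops): List.set
def pvUpd (t : List (List (Option Int))) (i j : Nat) (v : Option Int) :
    List (List (Option Int)) :=
  t.set i ((t.getD i []).set j v)

def generate_multiplication_table (numbers : List Int) (output_format : String) :
    List (List (Option Int)) :=
  let primes := numbers.filter pvIsPrimeA
  let k := primes.length
  let t0 : List (List (Option Int)) := List.replicate (k+1) (List.replicate (k+1) none)
  let t := (List.range k).foldl (fun t i =>
      let t := pvUpd t 0 (i+1) (some (primes.getD i 0))
      let t := pvUpd t (i+1) 0 (some (primes.getD i 0))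
      (List.range (i+1)).foldl (fun t j =>
        let t := pvUpd t (i+1) (j+1) (some (primes.getD i 0 * primes.getD j 0))
        if i ≠ j then pvUpd t (j+1) (i+1) ((t.getD (i+1) []).getD (j+1) none) else t) t) t0
  -- Python's binary branch rewrites the cells to strings, leaving the declared
  -- Option Int cell type; those inputs are excluded by Pre_ (output_format ≠ "binary").
  t

-- ===== PORT B =====
def pvIsPrimeB (n : Int) : Bool :=
  decide (2 ≤ n) && (PySem.List.pyRange 2 ((Nat.sqrt n.toNat : Int) + 1) 1).all
        (fun d => !(PySem.Int.mod n d == 0))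

def generate_multiplication_table_alt (numbers : List Int) (output_format : String) :
    List (List (Option Int)) :=
  let primes := numbers.filter pvIsPrimeB
  (none :: primes.map some) :: primes.map (fun p => some p :: primes.map (fun q => some (p * q)))
  -- binary mode (string cells) is outside Pre_, as for port A

-- ===== PRECONDITION & SPEC =====
-- Pre_ excludes output_format = "binary": there Python A (and B) return a table of
-- STRINGS (bin(x)[2:]), not values of the declared List (List (Option Int)) type.
def Pre_generate_multiplication_table (numbers : List Int) (output_format : String) : Prop :=
  output_format ≠ "binary"
instance (numbers : List Int) (output_format : String) : Decidable (Pre_generate_multiplication_table numbers output_format) := by unfold Pre_generate_multiplication_table; infer_instance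
def pvWitness_generate_multiplication_table : List Int × String := ([2, 3, 4], "decimal")

def Spec_generate_multiplication_table (numbers : List Int) (output_format : String) (out : List (List (Option Int))) : Prop := out = generate_multiplication_table_alt numbers output_format
instance (numbers : List Int) (output_format : String) (out : List (List (Option Int))) : Decidable (Spec_generate_multiplication_table numbers output_format out) := by unfold Spec_generate_multiplication_table; infer_instance

-- ===== CLAIM (what is proved, stated in full; the proofs are below) =====
def Claim_equal_generate_multiplication_table : Prop := ∀ (numbers : List Int) (output_format : String), Dom_generate_multiplication_table numbers output_format → Pre_generate_multiplication_table numbers output_format → Spec_generate_multiplication_table numbers output_format (generate_multiplication_table numbers output_format)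

-- ===== LEMMAS AND PROOFS =====

theorem pvIsPrime_eq (n : Int) : pvIsPrimeA n = pvIsPrimeB n := by
  unfold pvIsPrimeA pvIsPrimeB
  by_cases h : n < 2
  · simp [h, show ¬ (2 ≤ n) by omega]
  · simp [h, show 2 ≤ n by omega]

-- cell read, total (out of range = none, like pvF below)
def pvGet2 (t : List (List (Option Int))) (a b : Nat) : Option Int :=
  (t.getD a []).getD b none

-- the table after m outer iterations, as a function of the cell position
def pvF (P : List Int) (m a b : Nat) : Option Int :=
  if a = 0 then (if 1 ≤ b ∧ b ≤ m then some (P.getD (b-1) 0) else none)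
  else if b = 0 then (if a ≤ m then some (P.getD (a-1) 0) else none)
  else if a ≤ m ∧ b ≤ m then some (P.getD (a-1) 0 * P.getD (b-1) 0) else none

def pvShape (k : Nat) (t : List (List (Option Int))) : Prop :=
  t.length = k + 1 ∧ ∀ r ∈ t, r.length = k + 1

theorem pvShape_upd {k : Nat} {t} (ht : pvShape k t) {i : Nat} (hi : i ≤ k) (j : Nat)
    (v : Option Int) : pvShape k (pvUpd t i j v) := by
  obtain ⟨hl, hr⟩ := ht
  refine ⟨by simp [pvUpd, hl], ?_⟩
  intro r hrm
  rcases List.mem_or_eq_of_mem_set hrm with h | h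
  · exact hr r h
  · have hi' : i < t.length := by omega
    subst h
    rw [List.length_set, List.getD_eq_getElem t [] hi']
    exact hr _ (List.getElem_mem hi')

theorem pvGet2_upd {k : Nat} {t} (ht : pvShape k t) {i j : Nat} (hi : i ≤ k) (hj : j ≤ k)
    (v : Option Int) (a b : Nat) :
    pvGet2 (pvUpd t i j v) a b = if a = i ∧ b = j then v else pvGet2 t a b := by
  obtain ⟨hl, hr⟩ := ht
  have hi' : i < t.length := by omega
  have hrow : (t[i]?.getD []).length = k + 1 := by
    rw [List.getElem?_eq_getElem hi']; exact hr _ (List.getElem_mem hi')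
  simp only [pvGet2, pvUpd, List.getD_eq_getElem?_getD, List.getElem?_set]
  by_cases ha : i = a
  · subst ha
    by_cases hb : j = b
    · subst hb
      have h2 : j < t[i].length := by rw [hr _ (List.getElem_mem hi')]; omega
      simp [hi', List.getElem?_set_self h2]
    · simp [hi', List.getElem?_set_ne hb]
      intro h; exact absurd h.symm hb
  · simp [ha]
    intro h; exact absurd h.symm ha
def pvInnerF (P : List Int) (i : Nat) :
    List (List (Option Int)) → Nat → List (List (Option Int)) := fun t j =>
  let t := pvUpd t (i+1) (j+1) (some (P.getD i 0 * P.getD j 0))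
  if i ≠ j then pvUpd t (j+1) (i+1) ((t.getD (i+1) []).getD (j+1) none) else t

def pvOuter (P : List Int) (m : Nat) : List (List (Option Int)) :=
  (List.range m).foldl (fun t i =>
    (List.range (i+1)).foldl (pvInnerF P i)
      (pvUpd (pvUpd t 0 (i+1) (some (P.getD i 0))) (i+1) 0 (some (P.getD i 0))))
    (List.replicate (P.length+1) (List.replicate (P.length+1) none))

theorem pvInner_partial (P : List Int) (i : Nat) (hik : i < P.length) (t)
    (ht : pvShape P.length t) : ∀ r, r ≤ i + 1 →
    pvShape P.length ((List.range r).foldl (pvInnerF P i) t) ∧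
    ∀ a b, pvGet2 ((List.range r).foldl (pvInnerF P i) t) a b =
      if a = i+1 ∧ 1 ≤ b ∧ b ≤ r then some (P.getD i 0 * P.getD (b-1) 0)
      else if b = i+1 ∧ 1 ≤ a ∧ a ≤ r ∧ a ≠ i+1 then some (P.getD i 0 * P.getD (a-1) 0)
      else pvGet2 t a b := by
  intro r
  induction r with
  | zero =>
    intro _
    refine ⟨ht, fun a b => ?_⟩
    rw [if_neg (by omega), if_neg (by omega)]
    simp
  | succ r ih =>
    intro hr
    obtain ⟨hs, hg⟩ := ih (by omega)
    rw [List.range_succ, List.foldl_append, List.foldl_cons, List.foldl_nil]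
    set T := (List.range r).foldl (pvInnerF P i) t with hT
    have hs1 : pvShape P.length (pvUpd T (i+1) (r+1) (some (P.getD i 0 * P.getD r 0))) :=
      pvShape_upd hs (by omega) _ _
    have hg1 := pvGet2_upd hs (show i+1 ≤ P.length by omega) (show r+1 ≤ P.length by omega)
      (some (P.getD i 0 * P.getD r 0))
    set T1 := pvUpd T (i+1) (r+1) (some (P.getD i 0 * P.getD r 0)) with hT1
    have hread : (T1.getD (i+1) []).getD (r+1) none = some (P.getD i 0 * P.getD r 0) := by
      have h := hg1 (i+1) (r+1)
      rw [if_pos ⟨rfl, rfl⟩] at h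
      exact h
    by_cases hir : i = r
    · subst hir
      have hstep : pvInnerF P i T i = T1 := by
        unfold pvInnerF
        rw [if_neg (by omega)]
      rw [hstep]
      refine ⟨hs1, fun a b => ?_⟩
      rw [hg1, hg]
      by_cases hA : a = i+1 <;> by_cases hB : b = i+1
      · subst hA; subst hB
        rw [if_pos ⟨rfl, rfl⟩, if_pos ⟨rfl, by omega, by omega⟩]
        simp
      · subst hA
        rw [if_neg (by omega)]
        by_cases h1 : 1 ≤ b ∧ b ≤ i
        · rw [if_pos ⟨rfl, by omega, by omega⟩, if_pos ⟨rfl, by omega, by omega⟩]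
        · rw [if_neg (by omega), if_neg (by omega), if_neg (by omega), if_neg (by omega)]
      · subst hB
        rw [if_neg (by omega)]
        by_cases h1 : 1 ≤ a ∧ a ≤ i
        · rw [if_neg (by omega), if_pos ⟨rfl, by omega, by omega, by omega⟩,
              if_neg (by omega), if_pos ⟨rfl, by omega, by omega, by omega⟩]
        · rw [if_neg (by omega), if_neg (by omega), if_neg (by omega), if_neg (by omega)]
      · rw [if_neg (by omega), if_neg (by omega), if_neg (by omega),
            if_neg (by omega), if_neg (by omega)]
    · have hstep : pvInnerF P i T r =
          pvUpd T1 (r+1) (i+1) (some (P.getD i 0 * P.getD r 0)) := by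
        unfold pvInnerF
        rw [if_pos hir, hread]
      rw [hstep]
      have hs2 : pvShape P.length (pvUpd T1 (r+1) (i+1) (some (P.getD i 0 * P.getD r 0))) :=
        pvShape_upd hs1 (by omega) _ _
      have hg2 := pvGet2_upd hs1 (show r+1 ≤ P.length by omega) (show i+1 ≤ P.length by omega)
        (some (P.getD i 0 * P.getD r 0))
      refine ⟨hs2, fun a b => ?_⟩
      rw [hg2, hg1, hg]
      by_cases hC1 : a = i+1 ∧ b = r+1
      · obtain ⟨h1, h2⟩ := hC1
        subst h1; subst h2
        rw [if_neg (by omega), if_pos ⟨rfl, rfl⟩, if_pos ⟨rfl, by omega, by omega⟩]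
        simp
      · by_cases hC2 : a = r+1 ∧ b = i+1
        · obtain ⟨h1, h2⟩ := hC2
          subst h1; subst h2
          rw [if_pos ⟨rfl, rfl⟩, if_neg (by omega),
              if_pos ⟨rfl, by omega, by omega, by omega⟩]
          simp
        · rw [if_neg (by omega), if_neg (by omega)]
          by_cases hD1 : a = i+1 ∧ 1 ≤ b ∧ b ≤ r
          · rw [if_pos ⟨hD1.1, hD1.2.1, hD1.2.2⟩, if_pos ⟨hD1.1, hD1.2.1, by omega⟩]
          · by_cases hD2 : b = i+1 ∧ 1 ≤ a ∧ a ≤ r ∧ a ≠ i+1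
            · rw [if_neg (by omega), if_pos ⟨hD2.1, hD2.2.1, hD2.2.2.1, hD2.2.2.2⟩,
                  if_neg (by omega), if_pos ⟨hD2.1, hD2.2.1, by omega, hD2.2.2.2⟩]
            · rw [if_neg (by omega), if_neg (by omega), if_neg (by omega), if_neg (by omega)]

theorem pvOuter_spec (P : List Int) : ∀ m, m ≤ P.length →
    pvShape P.length (pvOuter P m) ∧
    ∀ a b, pvGet2 (pvOuter P m) a b = pvF P m a b := by
  intro m
  induction m with
  | zero =>
    intro _
    constructor
    · refine ⟨by simp [pvOuter], fun r hr => ?_⟩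
      have hr' : r ∈ List.replicate (P.length+1) (List.replicate (P.length+1) (none : Option Int)) := by
        simpa [pvOuter] using hr
      rw [List.eq_of_mem_replicate hr']
      simp
    · intro a b
      have hL : pvGet2 (pvOuter P 0) a b = none := by
        simp only [pvOuter, List.range_zero, List.foldl_nil, pvGet2,
          List.getD_eq_getElem?_getD, List.getElem?_replicate]
        by_cases ha : a < P.length + 1 <;> by_cases hb : b < P.length + 1 <;>
          simp [ha, hb]
      rw [hL]
      unfold pvF
      split_ifs <;> first | rfl | omega
  | succ m ih =>
    intro hm
    obtain ⟨hs, hg⟩ := ih (by omega)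
    unfold pvOuter at hs hg ⊢
    rw [List.range_succ, List.foldl_append, List.foldl_cons, List.foldl_nil]
    have hs1 := pvShape_upd hs (show (0:Nat) ≤ P.length by omega) (m+1) (some (P.getD m 0))
    have hg1 := pvGet2_upd hs (show (0:Nat) ≤ P.length by omega)
      (show m+1 ≤ P.length by omega) (some (P.getD m 0))
    have hs2 := pvShape_upd hs1 (show m+1 ≤ P.length by omega) 0 (some (P.getD m 0))
    have hg2 := pvGet2_upd hs1 (show m+1 ≤ P.length by omega)
      (show (0:Nat) ≤ P.length by omega) (some (P.getD m 0))
    obtain ⟨hs3, hg3⟩ := pvInner_partial P m (by omega) _ hs2 (m+1) le_rfl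
    refine ⟨hs3, fun a b => ?_⟩
    rw [hg3 a b, hg2, hg1, hg]
    unfold pvF
    by_cases ha0 : a = 0
    · subst ha0
      rw [if_neg (by omega), if_neg (by omega), if_neg (by omega)]
      by_cases hb : b = m+1
      · subst hb
        rw [if_pos ⟨rfl, rfl⟩, if_pos rfl, if_pos (by omega)]
        simp
      · rw [if_neg (by omega), if_pos rfl, if_pos rfl]
        by_cases hb2 : 1 ≤ b ∧ b ≤ m
        · rw [if_pos hb2, if_pos (by omega)]
        · rw [if_neg hb2, if_neg (by omega)]
    · by_cases hb0 : b = 0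
      · subst hb0
        rw [if_neg (by omega), if_neg (by omega)]
        by_cases ham : a = m+1
        · subst ham
          rw [if_pos ⟨rfl, rfl⟩, if_neg ha0, if_pos rfl, if_pos (by omega)]
          simp
        · rw [if_neg (by omega), if_neg (by omega), if_neg ha0, if_pos rfl,
              if_neg ha0, if_pos rfl]
          by_cases h2 : a ≤ m
          · rw [if_pos h2, if_pos (by omega)]
          · rw [if_neg h2, if_neg (by omega)]
      · by_cases hC1 : a = m+1 ∧ 1 ≤ b ∧ b ≤ m+1
        · obtain ⟨h1, h2, h3⟩ := hC1
          subst h1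
          rw [if_pos ⟨rfl, h2, h3⟩, if_neg ha0, if_neg hb0, if_pos ⟨by omega, by omega⟩]
          simp
        · by_cases hC2 : b = m+1 ∧ 1 ≤ a ∧ a ≤ m+1 ∧ a ≠ m+1
          · obtain ⟨h1, h2, h3, h4⟩ := hC2
            subst h1
            rw [if_neg (by omega), if_pos ⟨rfl, h2, h3, h4⟩, if_neg ha0, if_neg hb0,
                if_pos ⟨by omega, by omega⟩]
            simp [Int.mul_comm]
          · rw [if_neg (by omega), if_neg (by omega), if_neg (by omega), if_neg (by omega),
                if_neg ha0, if_neg hb0, if_neg ha0, if_neg hb0]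
            by_cases hD : a ≤ m ∧ b ≤ m
            · rw [if_pos hD, if_pos (by omega)]
            · rw [if_neg hD, if_neg (by omega)]

theorem pvTable_eq (P : List Int) (t : List (List (Option Int)))
    (ht : pvShape P.length t) (hg : ∀ a b, pvGet2 t a b = pvF P P.length a b) :
    t = (none :: P.map some) :: P.map (fun p => some p :: P.map (fun q => some (p * q))) := by
  obtain ⟨hl, hr⟩ := ht
  have hcell : ∀ a b (hab : a < t.length), (t[a]'hab)[b]? =
      if b < P.length + 1 then some (pvF P P.length a b) else none := by
    intro a b hab
    have hrl : (t[a]'hab).length = P.length + 1 := hr _ (List.getElem_mem hab)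
    have hgab := hg a b
    simp only [pvGet2, List.getD_eq_getElem?_getD, List.getElem?_eq_getElem hab,
      Option.getD_some] at hgab
    by_cases hb : b < P.length + 1
    · rw [if_pos hb, ← hgab, List.getElem?_eq_getElem (show b < (t[a]'hab).length by omega),
          Option.getD_some]
    · rw [if_neg hb, List.getElem?_eq_none (by omega)]
  apply List.ext_getElem?
  intro a
  by_cases ha : a < P.length + 1
  · rw [List.getElem?_eq_getElem (show a < t.length by omega)]
    cases a with
    | zero =>
      rw [List.getElem?_cons_zero]
      congr 1
      apply List.ext_getElem?
      intro b
      rw [hcell 0 b (by omega)]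
      cases b with
      | zero =>
        rw [List.getElem?_cons_zero, if_pos (by omega)]
        unfold pvF
        rw [if_pos rfl, if_neg (by omega)]
      | succ d =>
        rw [List.getElem?_cons_succ, List.getElem?_map]
        by_cases hd : d < P.length
        · rw [if_pos (by omega), List.getElem?_eq_getElem hd]
          unfold pvF
          rw [if_pos rfl, if_pos ⟨by omega, by omega⟩]
          simp [List.getD_eq_getElem?_getD, List.getElem?_eq_getElem hd]
        · rw [if_neg (by omega), List.getElem?_eq_none (by omega)]
          rfl
    | succ c =>
      rw [List.getElem?_cons_succ, List.getElem?_map,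
          List.getElem?_eq_getElem (show c < P.length by omega), Option.map_some]
      congr 1
      apply List.ext_getElem?
      intro b
      rw [hcell (c+1) b (by omega)]
      cases b with
      | zero =>
        rw [List.getElem?_cons_zero, if_pos (by omega)]
        unfold pvF
        rw [if_neg (by omega), if_pos rfl, if_pos (by omega)]
        simp [List.getD_eq_getElem?_getD, List.getElem?_eq_getElem (show c < P.length by omega)]
      | succ d =>
        rw [List.getElem?_cons_succ, List.getElem?_map]
        by_cases hd : d < P.length
        · rw [if_pos (by omega), List.getElem?_eq_getElem hd]
          unfold pvF
          rw [if_neg (by omega), if_neg (by omega), if_pos ⟨by omega, by omega⟩]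
          simp [List.getD_eq_getElem?_getD, List.getElem?_eq_getElem hd,
            List.getElem?_eq_getElem (show c < P.length by omega)]
        · rw [if_neg (by omega), List.getElem?_eq_none (by omega)]
          rfl
  · rw [List.getElem?_eq_none (by omega), List.getElem?_eq_none (by simp; omega)]

-- ===== VERDICT (by name: the statement is the Claim_ definition above) =====
theorem generate_multiplication_table_spec : Claim_equal_generate_multiplication_table := by
  intro numbers output_format _ _
  unfold Spec_generate_multiplication_table
  have hfilter : numbers.filter pvIsPrimeA = numbers.filter pvIsPrimeB :=
    List.filter_congr (fun x _ => pvIsPrime_eq x)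
  have hA : generate_multiplication_table numbers output_format =
      pvOuter (numbers.filter pvIsPrimeA) (numbers.filter pvIsPrimeA).length := rfl
  obtain ⟨hs, hg⟩ := pvOuter_spec (numbers.filter pvIsPrimeA) _ le_rfl
  rw [hA, pvTable_eq _ _ hs hg, hfilter]
  rfl
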